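-- pv_equiv track=rewrite | github.com/khanklatt/wordle-solver | wordle_solver.py | convert_yellow_letters
-- ===== SOURCE A (Python) =====
-- from typing import Dict, Set, List, Tuple, Optional, Callable, Any
--
-- def convert_yellow_letters(yellow_string: str) -> Dict[str, Set[int]]:
--     """
--     Convert yellow letters into letter-to-excluded-positions mapping dictionary
--
--     Requirement 2.5: Convert yellow letters into letter-to-excluded-positions mapping dictionary
--
--     Args:
--         yellow_string: String with letters and dots (e.g., ".A..." meaning A is present but not in position 2)
--
--     Returns:
--         Dictionary mapping letter to set of excluded positions (1-indexed)
--     """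
--     mapping = {}
--     for i, char in enumerate(yellow_string, start=1):
--         if char != '.':
--             letter = char.upper()
--             if letter not in mapping:
--                 mapping[letter] = set()
--             mapping[letter].add(i)
--     return mapping
-- ===== SOURCE B (Python) =====
-- def convert_yellow_letters(yellow_string: str):
--     """Build the (letter, position) pair list once, then group positions per
--     first-occurrence-ordered distinct letter with comprehensions."""
--     pairs = [(c.upper(), i) for i, c in enumerate(yellow_string, start=1) if c != '.']
--     letters = dict.fromkeys(letter for letter, _ in pairs)
--     return {letter: {i for l, i in pairs if l == letter} for letter in letters}
-- ===== Notes on version B (the rewrite author's own statement) =====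
-- stated objective: alternative
-- what changed: Replaces the incremental dict-of-sets mutation loop with a declarative pipeline: build the (letter, position) pair list once, take the first-occurrence-ordered distinct letters with dict.fromkeys, and construct each letter's position set by a comprehension over the pair list.
import Mathlib
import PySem

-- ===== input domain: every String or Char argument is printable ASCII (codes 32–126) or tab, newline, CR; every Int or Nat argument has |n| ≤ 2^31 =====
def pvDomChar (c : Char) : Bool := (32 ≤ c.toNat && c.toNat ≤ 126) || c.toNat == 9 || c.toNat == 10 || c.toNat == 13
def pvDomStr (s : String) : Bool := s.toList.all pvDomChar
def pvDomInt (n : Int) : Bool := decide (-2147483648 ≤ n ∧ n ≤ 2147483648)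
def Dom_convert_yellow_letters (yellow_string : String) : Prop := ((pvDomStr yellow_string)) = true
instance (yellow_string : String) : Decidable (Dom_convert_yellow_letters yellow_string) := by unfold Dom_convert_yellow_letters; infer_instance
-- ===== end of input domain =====

-- B replaces A's incremental dict-of-sets mutation with a build-pairs-once,
-- dedup-letters, group-by-comprehension pipeline (alternative decomposition, not faster).


-- c.upper() on a one-character string (both Pythons call it)
def pvUpper1 (c : Char) : String := String.mk (PySem.Chars.upper [c])

-- ===== PORT A =====
-- literal port: for i, char in enumerate(s, 1): if char != '.': setdefault-style insert, then mapping[letter].add(i)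
def convert_yellow_letters (yellow_string : String) : List (String × List Int) :=
  ((PySem.List.enumerate yellow_string.toList 1).foldl
    (fun (mapping : PySem.Dict String (PySem.Set Int)) p =>
      if p.2 ≠ '.' then
        let letter := pvUpper1 p.2
        let mapping := if mapping.contains letter then mapping
                       else mapping.insert letter PySem.Set.empty
        -- mapping[letter].add(i); the key is present, so getD's default is never used
        mapping.insert letter (PySem.Set.add (mapping.getD letter PySem.Set.empty) p.1)
      else mapping)
    PySem.Dict.empty).items

-- ===== PORT B =====
def convert_yellow_letters_alt (yellow_string : String) : List (String × List Int) :=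
  let pairs := (PySem.List.enumerate yellow_string.toList 1).filterMap
    (fun p => if p.2 ≠ '.' then some (pvUpper1 p.2, p.1) else none)
  (PySem.List.dedup (pairs.map (·.1))).map
    (fun letter => (letter,
      PySem.Set.ofList (pairs.filterMap (fun q => if q.1 == letter then some q.2 else none))))

-- ===== PRECONDITION & SPEC =====
def Spec_convert_yellow_letters (yellow_string : String) (out : List (String × List Int)) : Prop := out = convert_yellow_letters_alt yellow_string
instance (yellow_string : String) (out : List (String × List Int)) : Decidable (Spec_convert_yellow_letters yellow_string out) := by unfold Spec_convert_yellow_letters; infer_instance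

-- ===== CLAIM (what is proved, stated in full; the proofs are below) =====
def Claim_equal_convert_yellow_letters : Prop := ∀ (yellow_string : String), Dom_convert_yellow_letters yellow_string → Spec_convert_yellow_letters yellow_string (convert_yellow_letters yellow_string)

-- ===== LEMMAS AND PROOFS =====

-- the step A performs on each non-dot (letter, position) pair
def pvStepA (d : PySem.Dict String (PySem.Set Int)) (q : String × Int) : PySem.Dict String (PySem.Set Int) :=
  let d := if d.contains q.1 then d else d.insert q.1 PySem.Set.empty
  d.insert q.1 (PySem.Set.add (d.getD q.1 PySem.Set.empty) q.2)

-- a fold whose step skips non-matching elements is a fold over the filterMap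
lemma pvFoldl_guard {α β σ : Type} (c : α → Prop) [DecidablePred c] (g : α → β)
    (f : σ → β → σ) (l : List α) (d : σ) :
    l.foldl (fun s a => if c a then f s (g a) else s) d
      = (l.filterMap (fun a => if c a then some (g a) else none)).foldl f d := by
  induction l generalizing d with
  | nil => rfl
  | cons a l ih =>
    by_cases h : c a
    · simp only [List.foldl_cons, List.filterMap_cons, if_pos h]; exact ih _
    · simp only [List.foldl_cons, List.filterMap_cons, if_neg h]; exact ih _

-- on a fresh position, A's step is a modify-append
lemma pvStepA_eq_modify (d : PySem.Dict String (PySem.Set Int)) (q : String × Int)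
    (h : q.2 ∉ d.getD q.1 PySem.Set.empty) :
    pvStepA d q = d.modify q.1 [] (· ++ [q.2]) := by
  have hemp : PySem.Set.empty = ([] : List Int) := rfl
  rw [hemp] at h
  unfold pvStepA PySem.Dict.modify
  rw [hemp]
  by_cases hc : d.contains q.1
  · rw [if_pos hc]
    have hadd : PySem.Set.add (d.getD q.1 ([] : List Int)) q.2 = d.getD q.1 [] ++ [q.2] := by
      simp [PySem.Set.add, PySem.Set.contains, h]
    simp [hadd]
  · rw [if_neg hc]
    have h1 : (d.insert q.1 ([] : List Int)).getD q.1 ([] : List Int) = [] :=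
      PySem.Dict.getD_insert_self d q.1 [] []
    have h2 : d.getD q.1 ([] : List Int) = [] :=
      PySem.Dict.getD_of_not_contains d ([] : List Int) (by simpa using hc)
    rw [PySem.Dict.insert_insert_self]
    simp [h1, h2, PySem.Set.add, PySem.Set.contains]

-- with pairwise-distinct positions, the pvStepA fold is the modify-append fold
lemma pvFold_stepA_eq_modify (pairs : List (String × Int)) (d : PySem.Dict String (PySem.Set Int))
    (hnd : (pairs.map (·.2)).Nodup)
    (hfresh : ∀ q ∈ pairs, ∀ k, q.2 ∉ d.getD k PySem.Set.empty) :
    pairs.foldl pvStepA d = pairs.foldl (fun d q => d.modify q.1 [] (· ++ [q.2])) d := by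
  induction pairs generalizing d with
  | nil => rfl
  | cons q pairs ih =>
    rw [List.map_cons, List.nodup_cons] at hnd
    simp only [List.foldl_cons]
    rw [pvStepA_eq_modify d q (hfresh q (by simp) q.1)]
    refine ih _ hnd.2 ?_
    intro r hr k
    have hkd : (d.modify q.1 [] (· ++ [q.2])).getD k PySem.Set.empty
        = if k = q.1 then d.getD q.1 PySem.Set.empty ++ [q.2] else d.getD k PySem.Set.empty := by
      simpa [PySem.Set.empty] using PySem.Dict.getD_modify d q.1 k ([] : List Int) (· ++ [q.2])
    rw [hkd]
    have hne : r.2 ≠ q.2 := by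
      intro he
      exact hnd.1 (he ▸ List.mem_map_of_mem hr)
    split_ifs with hk
    · simp only [List.mem_append, List.mem_singleton]
      rintro (hm | hm)
      · exact hfresh r (by simp [hr]) q.1 hm
      · exact hne hm
    · exact hfresh r (by simp [hr]) k

-- positions in B's pair list are strictly increasing, hence Nodup
lemma pvPairs_snd_nodup (cs : List Char) :
    (((PySem.List.enumerate cs 1).filterMap
      (fun p => if p.2 ≠ '.' then some (pvUpper1 p.2, p.1) else none)).map (·.2)).Nodup := by
  have hpw : ((PySem.List.enumerate cs 1).filterMap
      (fun p => if p.2 ≠ '.' then some (pvUpper1 p.2, p.1) else none)).Pairwise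
      (fun a b => a.2 < b.2) := by
    refine List.Pairwise.filterMap _ ?_ (PySem.List.pairwise_lt_enumerate cs 1)
    intro a b hab x hx y hy
    by_cases ha : a.2 ≠ '.' <;> by_cases hb : b.2 ≠ '.' <;> simp [ha, hb] at hx hy
    rw [← hx, ← hy]; exact hab
  have := List.Pairwise.map (S := fun a b : Int => a < b) (fun q : String × Int => q.2)
    (fun _ _ hab => hab) hpw
  exact List.Pairwise.imp ne_of_lt this

-- the per-letter comprehension is a filter-then-map
lemma pvFilterMap_eq_filter_map (pairs : List (String × Int)) (letter : String) :
    pairs.filterMap (fun q => if q.1 == letter then some q.2 else none)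
      = (pairs.filter (fun q => q.1 == letter)).map (·.2) := by
  induction pairs with
  | nil => rfl
  | cons q pairs ih =>
    rw [List.filterMap_cons, List.filter_cons]
    by_cases h : q.1 = letter <;> simp [h] <;> simpa using ih

-- ===== VERDICT (by name: the statement is the Claim_ definition above) =====
theorem convert_yellow_letters_spec : Claim_equal_convert_yellow_letters := by
  intro s _
  unfold Spec_convert_yellow_letters convert_yellow_letters convert_yellow_letters_alt
  have hstep : (fun (mapping : PySem.Dict String (PySem.Set Int)) (p : Int × Char) =>
      if p.2 ≠ '.' then
        let letter := pvUpper1 p.2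
        let mapping := if mapping.contains letter then mapping
                       else mapping.insert letter PySem.Set.empty
        mapping.insert letter (PySem.Set.add (mapping.getD letter PySem.Set.empty) p.1)
      else mapping)
      = fun mapping p => if p.2 ≠ '.' then pvStepA mapping (pvUpper1 p.2, p.1) else mapping := rfl
  rw [hstep, pvFoldl_guard (fun p : Int × Char => p.2 ≠ '.') (fun p => (pvUpper1 p.2, p.1)) pvStepA]
  set pairs := (PySem.List.enumerate s.toList 1).filterMap
      (fun p => if p.2 ≠ '.' then some (pvUpper1 p.2, p.1) else none) with hpairs
  have hnd : (pairs.map (·.2)).Nodup := by rw [hpairs]; exact pvPairs_snd_nodup s.toList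
  rw [pvFold_stepA_eq_modify pairs PySem.Dict.empty hnd
      (by intro q _ k; simp [PySem.Dict.getD_empty, PySem.Set.empty])]
  have hkeys : (pairs.foldl (fun d q => d.modify q.1 [] (· ++ [q.2])) PySem.Dict.empty).keys
      = PySem.Set.ofList (pairs.map (·.1)) := by
    have := PySem.Dict.keys_foldl_modify_key pairs (·.1) ([] : List Int)
      (fun _ q v => v ++ [q.2]) PySem.Dict.empty
    simpa [PySem.Dict.keys_empty, PySem.Set.update, PySem.Set.ofList] using this
  have hnodup : (pairs.foldl (fun d q => d.modify q.1 [] (· ++ [q.2])) PySem.Dict.empty).keys.Nodup :=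
    PySem.Dict.nodup_keys_foldl_modify_key pairs (·.1) ([] : List Int)
      (fun _ q v => v ++ [q.2]) PySem.Dict.empty (by simp [PySem.Dict.keys_empty])
  rw [PySem.Dict.items_eq_map_keys _ hnodup ([] : List Int), hkeys, ← PySem.List.dedup_eq_ofList]
  apply List.map_congr_left
  intro letter hmem
  have hget := PySem.Dict.getD_foldl_modify_append pairs PySem.Dict.empty letter
  simp only [PySem.Dict.getD_empty, List.nil_append] at hget
  rw [hget, pvFilterMap_eq_filter_map]
  refine congrArg _ ?_
  have hsub : ((pairs.filter (fun q => q.1 == letter)).map (·.2)).Nodup :=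
    hnd.sublist (List.Sublist.map _ List.filter_sublist)
  exact (PySem.Set.ofList_eq_self_of_nodup _ hsub).symm
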